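-- pv_equiv track=rewrite | github.com/ashadak/Pig_Latin | pigLatin.py | leftmostVowel
-- ===== SOURCE A (Python) =====
-- def leftmostVowel(string) :
--     if string == "" :
--         return -1
--
--     elif string[0] in ["a","e","i","o","u"] :
--         return 0
--
--     else :
--         index = leftmostVowel(string[1:])
--         if index == -1 :
--             return -1
--         else :
--             index = index + 1
--
--     return index
-- ===== SOURCE B (Python) =====
-- def leftmostVowel(string):
--     hits = [i for i, c in enumerate(string) if c in "aeiou"]
--     return hits[0] if hits else -1
-- ===== Notes on version B (the rewrite author's own statement) =====
-- stated objective: simpler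
-- what changed: Replaced A's suffix recursion with index fix-up on return by a staged pipeline: enumerate the string, filter the vowel positions into a list, and return its head (or -1 if empty).
import Mathlib
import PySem

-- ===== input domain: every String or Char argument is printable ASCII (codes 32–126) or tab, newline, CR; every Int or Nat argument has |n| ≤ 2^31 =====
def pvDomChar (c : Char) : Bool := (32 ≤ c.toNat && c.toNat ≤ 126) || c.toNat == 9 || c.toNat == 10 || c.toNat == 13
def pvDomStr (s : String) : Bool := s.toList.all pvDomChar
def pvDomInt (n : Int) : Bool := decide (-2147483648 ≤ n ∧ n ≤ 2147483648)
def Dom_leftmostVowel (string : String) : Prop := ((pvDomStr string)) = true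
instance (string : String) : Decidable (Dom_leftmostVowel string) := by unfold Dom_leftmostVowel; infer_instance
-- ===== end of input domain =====

-- B replaces A's suffix recursion (index fixed up on return) by a staged pipeline: enumerate, filter the vowel positions, take the head; objective: simpler.
-- ===== PORT A =====
-- recursion on the character list mirrors A's recursion on string[1:]
def leftmostVowelA : List Char → Int
  | [] => -1
  | c :: rest =>
    if c ∈ ['a', 'e', 'i', 'o', 'u'] then 0
    else
      let index := leftmostVowelA rest
      if index = -1 then -1 else index + 1

def leftmostVowel (string : String) : Int := leftmostVowelA string.toList

-- ===== PORT B =====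
-- Source B's comprehension: enumerate the characters, keep the indices of vowels, head or -1
def leftmostVowel_alt (string : String) : Int :=
  let hits := (PySem.List.enumerate string.toList).filter
      (fun p => PySem.Chars.isIn [p.2] "aeiou".toList)
  match hits with
  | [] => -1
  | (i, _) :: _ => i

-- ===== PRECONDITION & SPEC =====
def Spec_leftmostVowel (string : String) (out : Int) : Prop := out = leftmostVowel_alt string
instance (string : String) (out : Int) : Decidable (Spec_leftmostVowel string out) := by unfold Spec_leftmostVowel; infer_instance

-- ===== CLAIM (what is proved, stated in full; the proofs are below) =====
def Claim_equal_leftmostVowel : Prop := ∀ (string : String), Dom_leftmostVowel string → Spec_leftmostVowel string (leftmostVowel string)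

-- ===== LEMMAS AND PROOFS =====
lemma leftmostVowelA_lb (l : List Char) : leftmostVowelA l = -1 ∨ 0 ≤ leftmostVowelA l := by
  induction l with
  | nil => left; rfl
  | cons c rest ih =>
    simp only [leftmostVowelA]
    split_ifs with h h2
    · right; norm_num
    · left; rfl
    · omega

-- the vowel membership test of B agrees with A's list membership
lemma singleton_infix {c : Char} {l : List Char} : [c] <:+: l ↔ c ∈ l := by
  constructor
  · rintro ⟨p, q, rfl⟩; simp
  · intro h
    obtain ⟨p, q, rfl⟩ := List.append_of_mem h
    exact ⟨p, q, by simp⟩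

-- the vowel membership test of B agrees with A's list membership
lemma vowel_test (c : Char) :
    PySem.Chars.isIn [c] "aeiou".toList = decide (c ∈ ['a', 'e', 'i', 'o', 'u']) := by
  by_cases h : c ∈ ['a', 'e', 'i', 'o', 'u']
  · simp only [List.mem_cons, List.not_mem_nil, or_false] at h
    rcases h with rfl | rfl | rfl | rfl | rfl <;> decide
  · have h2 : ¬ ([c] <:+: "aeiou".toList) := by
      rw [singleton_infix]; simpa using h
    simp only [h, decide_false]
    rw [← Bool.not_eq_true, PySem.Chars.isIn_iff_infix]
    exact h2

lemma hits_head (l : List Char) (n : Int) :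
    (match (PySem.List.enumerate l n).filter
        (fun p => decide (p.2 ∈ ['a', 'e', 'i', 'o', 'u'])) with
      | [] => (-1 : Int)
      | (i, _) :: _ => i)
    = if leftmostVowelA l = -1 then -1 else leftmostVowelA l + n := by
  induction l generalizing n with
  | nil => simp [PySem.List.enumerate_nil, leftmostVowelA]
  | cons c rest ih =>
    rw [PySem.List.enumerate_cons]
    by_cases h : c ∈ ['a', 'e', 'i', 'o', 'u']
    · simp [List.filter, h, leftmostVowelA]
    · simp only [List.filter, h, decide_false, ih (n + 1), leftmostVowelA, if_false]
      rcases leftmostVowelA_lb rest with h1 | h1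
      · simp [h1]
      · have h2 : leftmostVowelA rest ≠ -1 := by omega
        have h3 : ¬ (leftmostVowelA rest + 1 = -1) := by omega
        simp only [h2, h3, if_false]
        ring

-- ===== VERDICT (by name: the statement is the Claim_ definition above) =====
theorem leftmostVowel_spec : Claim_equal_leftmostVowel := by
  intro s _
  unfold Spec_leftmostVowel leftmostVowel leftmostVowel_alt
  simp only [vowel_test]
  rw [hits_head s.toList 0]
  rcases leftmostVowelA_lb s.toList with h | h <;> split_ifs <;> omega
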